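-- pv_equiv track=rewrite | github.com/mikeparcewski/wicked-garden | plugins/wicked-search/scripts/api.py | _search_nodes
-- ===== SOURCE A (Python) =====
-- def _search_nodes(nodes, query):
--     """Simple text search across node names and metadata."""
--     query_lower = query.lower()
--     results = []
--     for node in nodes:
--         name = (node.get("name") or "").lower()
--         node_type = (node.get("type") or node.get("node_type") or "").lower()
--         file_path = (node.get("file") or node.get("file_path") or "").lower()
--         # Score: exact match > starts with > contains
--         if query_lower == name:
--             results.append((0, node))
--         elif name.startswith(query_lower):
--             results.append((1, node))
--         elif query_lower in name or query_lower in file_path or query_lower in node_type: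
--             results.append((2, node))
--     results.sort(key=lambda x: x[0])
--     return [r[1] for r in results]
-- ===== SOURCE B (Python) =====
-- def _search_nodes(nodes, query):
--     """Text search across node names and metadata, best matches first."""
--     q = query.lower()
--
--     def rank(node):
--         name = (node.get("name") or "").lower()
--         if q == name:
--             return 0
--         if name.startswith(q):
--             return 1
--         node_type = (node.get("type") or node.get("node_type") or "").lower()
--         file_path = (node.get("file") or node.get("file_path") or "").lower()
--         if q in name or q in file_path or q in node_type:
--             return 2
--         return 3
--
--     return [n for r in (0, 1, 2) for n in nodes if rank(n) == r]
-- ===== Notes on version B (the rewrite author's own statement) =====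
-- stated objective: simpler
-- what changed: Replaces the score-tag-then-stable-sort accumulator pipeline with a pure rank function and three staged filter passes (one per rank) concatenated, eliminating the sort and the (score, node) tuples.
import Mathlib
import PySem

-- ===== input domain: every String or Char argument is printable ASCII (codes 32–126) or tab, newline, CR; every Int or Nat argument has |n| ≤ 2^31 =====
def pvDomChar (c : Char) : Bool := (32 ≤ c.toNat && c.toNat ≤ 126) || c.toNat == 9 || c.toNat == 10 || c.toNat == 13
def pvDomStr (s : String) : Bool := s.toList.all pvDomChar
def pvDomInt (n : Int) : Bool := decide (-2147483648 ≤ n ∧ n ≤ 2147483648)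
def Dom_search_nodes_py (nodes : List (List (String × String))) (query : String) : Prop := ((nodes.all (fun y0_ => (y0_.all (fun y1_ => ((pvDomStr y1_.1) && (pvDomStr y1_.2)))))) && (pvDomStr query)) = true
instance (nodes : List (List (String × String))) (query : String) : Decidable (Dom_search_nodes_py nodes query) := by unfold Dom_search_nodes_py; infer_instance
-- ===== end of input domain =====

-- B replaces A's score-tagging accumulator plus stable sort by a pure rank function and three
-- staged filter passes (one per rank) concatenated (objective: simpler — no sort, no tuples).

-- `o or fallback` on an Optional[str]: None and "" fall through (used by both Pythons verbatim)
def pvOrStr (o : Option String) (b : String) : String :=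
  match o with
  | some s => if s = "" then b else s
  | none => b

-- ===== PORT A =====
def search_nodes_py (nodes : List (List (String × String))) (query : String) : List (List (String × String)) :=
  let queryLower := PySem.Str.lower query
  let results := nodes.foldl (fun results node =>
    let d := PySem.Dict.ofList node
    let name := PySem.Str.lower (pvOrStr (d.get? "name") "")
    let nodeType := PySem.Str.lower (pvOrStr (d.get? "type") (pvOrStr (d.get? "node_type") ""))
    let filePath := PySem.Str.lower (pvOrStr (d.get? "file") (pvOrStr (d.get? "file_path") ""))
    if queryLower = name then results ++ [((0 : Int), node)]
    else if PySem.Str.startswith name queryLower then results ++ [((1 : Int), node)]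
    else if PySem.Str.isIn queryLower name || PySem.Str.isIn queryLower filePath || PySem.Str.isIn queryLower nodeType then results ++ [((2 : Int), node)]
    else results) []
  (PySem.List.sorted results (fun r => r.1)).map (fun r => r.2)

-- ===== PORT B =====
-- Source B's local `rank(node)` closure over q
def pvRankB (q : String) (node : List (String × String)) : Int :=
  let d := PySem.Dict.ofList node
  let name := PySem.Str.lower (pvOrStr (d.get? "name") "")
  if q = name then 0
  else if PySem.Str.startswith name q then 1
  else
    let nodeType := PySem.Str.lower (pvOrStr (d.get? "type") (pvOrStr (d.get? "node_type") ""))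
    let filePath := PySem.Str.lower (pvOrStr (d.get? "file") (pvOrStr (d.get? "file_path") ""))
    if PySem.Str.isIn q name || PySem.Str.isIn q filePath || PySem.Str.isIn q nodeType then 2
    else 3

def search_nodes_py_alt (nodes : List (List (String × String))) (query : String) : List (List (String × String)) :=
  let q := PySem.Str.lower query
  [(0 : Int), 1, 2].flatMap (fun r => nodes.filter (fun n => pvRankB q n == r))

-- ===== PRECONDITION & SPEC =====
def Spec_search_nodes_py (nodes : List (List (String × String))) (query : String) (out : List (List (String × String))) : Prop := out = search_nodes_py_alt nodes query
instance (nodes : List (List (String × String))) (query : String) (out : List (List (String × String))) : Decidable (Spec_search_nodes_py nodes query out) := by unfold Spec_search_nodes_py; infer_instance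

-- ===== CLAIM (what is proved, stated in full; the proofs are below) =====
def Claim_equal_search_nodes_py : Prop := ∀ (nodes : List (List (String × String))) (query : String), Dom_search_nodes_py nodes query → Spec_search_nodes_py nodes query (search_nodes_py nodes query)

-- ===== LEMMAS AND PROOFS =====

-- abbreviations for the proof (never used by the ports)
abbrev pvNode : Type := List (String × String)

def pvName (node : pvNode) : String :=
  PySem.Str.lower (pvOrStr ((PySem.Dict.ofList node).get? "name") "")
def pvType (node : pvNode) : String :=
  PySem.Str.lower (pvOrStr ((PySem.Dict.ofList node).get? "type") (pvOrStr ((PySem.Dict.ofList node).get? "node_type") ""))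
def pvFile (node : pvNode) : String :=
  PySem.Str.lower (pvOrStr ((PySem.Dict.ofList node).get? "file") (pvOrStr ((PySem.Dict.ofList node).get? "file_path") ""))

def pvClassify (ql : String) (node : pvNode) : List (Int × pvNode) :=
  if ql = pvName node then [(0, node)]
  else if PySem.Str.startswith (pvName node) ql then [(1, node)]
  else if PySem.Str.isIn ql (pvName node) || PySem.Str.isIn ql (pvFile node) || PySem.Str.isIn ql (pvType node) then [(2, node)]
  else []

def pvTag (i : Int) (l : List pvNode) : List (Int × pvNode) := l.map (fun v => (i, v))

def pvBf : Int × pvNode → Int × pvNode → Bool := fun a b => decide (a.1 < b.1)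

def pvBucket (i : Int) (rs : List (Int × pvNode)) : List pvNode :=
  (rs.filter (fun r => r.1 == i)).map (fun r => r.2)

lemma pvBucket_append (i : Int) (xs ys : List (Int × pvNode)) :
    pvBucket i (xs ++ ys) = pvBucket i xs ++ pvBucket i ys := by
  simp [pvBucket]

lemma stepA_eq (ql : String) (acc : List (Int × pvNode)) (node : pvNode) :
    (if ql = pvName node then acc ++ [((0 : Int), node)]
     else if PySem.Str.startswith (pvName node) ql then acc ++ [((1 : Int), node)]
     else if PySem.Str.isIn ql (pvName node) || PySem.Str.isIn ql (pvFile node) || PySem.Str.isIn ql (pvType node) then acc ++ [((2 : Int), node)]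
     else acc) = acc ++ pvClassify ql node := by
  unfold pvClassify; split_ifs <;> simp

lemma foldA_eq (ql : String) (nodes : List pvNode) (acc : List (Int × pvNode)) :
    nodes.foldl (fun acc node =>
      if ql = pvName node then acc ++ [((0 : Int), node)]
      else if PySem.Str.startswith (pvName node) ql then acc ++ [((1 : Int), node)]
      else if PySem.Str.isIn ql (pvName node) || PySem.Str.isIn ql (pvFile node) || PySem.Str.isIn ql (pvType node) then acc ++ [((2 : Int), node)]
      else acc) acc = acc ++ nodes.flatMap (pvClassify ql) := by
  have hfun : (fun (acc : List (Int × pvNode)) (node : pvNode) =>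
      if ql = pvName node then acc ++ [((0 : Int), node)]
      else if PySem.Str.startswith (pvName node) ql then acc ++ [((1 : Int), node)]
      else if PySem.Str.isIn ql (pvName node) || PySem.Str.isIn ql (pvFile node) || PySem.Str.isIn ql (pvType node) then acc ++ [((2 : Int), node)]
      else acc) = (fun acc node => acc ++ pvClassify ql node) := by
    funext acc node; exact stepA_eq ql acc node
  rw [hfun]
  induction nodes generalizing acc with
  | nil => simp
  | cons n ns ih => rw [List.foldl_cons, ih, List.flatMap_cons, List.append_assoc]

lemma classify_tags (ql : String) (node : pvNode) :
    ∀ r ∈ pvClassify ql node, r.1 = 0 ∨ r.1 = 1 ∨ r.1 = 2 := by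
  intro r hr
  unfold pvClassify at hr
  split_ifs at hr <;> simp_all

lemma ins0 (x : pvNode) (A B C : List pvNode) :
    PySem.List.insertBy pvBf (0, x) (pvTag 0 A ++ (pvTag 1 B ++ pvTag 2 C))
      = pvTag 0 (A ++ [x]) ++ (pvTag 1 B ++ pvTag 2 C) := by
  induction A with
  | nil =>
    cases B with
    | nil =>
      cases C with
      | nil => simp [pvTag, PySem.List.insertBy]
      | cons c cs => simp [pvTag, PySem.List.insertBy, pvBf]
    | cons b bs => simp [pvTag, PySem.List.insertBy, pvBf]
  | cons a as ih => simpa [pvTag, PySem.List.insertBy, pvBf] using ih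

lemma ins1 (x : pvNode) (A B C : List pvNode) :
    PySem.List.insertBy pvBf (1, x) (pvTag 0 A ++ (pvTag 1 B ++ pvTag 2 C))
      = pvTag 0 A ++ (pvTag 1 (B ++ [x]) ++ pvTag 2 C) := by
  induction A with
  | nil =>
    induction B with
    | nil =>
      cases C with
      | nil => simp [pvTag, PySem.List.insertBy]
      | cons c cs => simp [pvTag, PySem.List.insertBy, pvBf]
    | cons b bs ihb => simpa [pvTag, PySem.List.insertBy, pvBf] using ihb
  | cons a as ih => simpa [pvTag, PySem.List.insertBy, pvBf] using ih

lemma ins2 (x : pvNode) (A B C : List pvNode) :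
    PySem.List.insertBy pvBf (2, x) (pvTag 0 A ++ (pvTag 1 B ++ pvTag 2 C))
      = pvTag 0 A ++ (pvTag 1 B ++ pvTag 2 (C ++ [x])) := by
  induction A with
  | nil =>
    induction B with
    | nil =>
      induction C with
      | nil => simp [pvTag, PySem.List.insertBy]
      | cons c cs ihc => simpa [pvTag, PySem.List.insertBy, pvBf] using ihc
    | cons b bs ihb => simpa [pvTag, PySem.List.insertBy, pvBf] using ihb
  | cons a as ih => simpa [pvTag, PySem.List.insertBy, pvBf] using ih

lemma sort_buckets (rs : List (Int × pvNode)) :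
    ∀ (A B C : List pvNode), (∀ r ∈ rs, r.1 = 0 ∨ r.1 = 1 ∨ r.1 = 2) →
    rs.foldl (fun acc x => PySem.List.insertBy pvBf x acc) (pvTag 0 A ++ (pvTag 1 B ++ pvTag 2 C))
      = pvTag 0 (A ++ pvBucket 0 rs) ++ (pvTag 1 (B ++ pvBucket 1 rs) ++ pvTag 2 (C ++ pvBucket 2 rs)) := by
  induction rs with
  | nil => intro A B C _; simp [pvBucket]
  | cons r rs ih =>
    intro A B C h
    obtain ⟨i, v⟩ := r
    have hrest : ∀ r ∈ rs, r.1 = (0 : Int) ∨ r.1 = 1 ∨ r.1 = 2 := fun r hr => h r (List.mem_cons_of_mem _ hr)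
    rcases h (i, v) List.mem_cons_self with h0 | h1 | h2
    · have hi : i = 0 := h0
      subst hi
      rw [List.foldl_cons, ins0, ih (A ++ [v]) B C hrest]
      simp [pvBucket]
    · have hi : i = 1 := h1
      subst hi
      rw [List.foldl_cons, ins1, ih A (B ++ [v]) C hrest]
      simp [pvBucket]
    · have hi : i = 2 := h2
      subst hi
      rw [List.foldl_cons, ins2, ih A B (C ++ [v]) hrest]
      simp [pvBucket]

-- per-node: the i-bucket of one classification is the rank-i filter of the singleton
lemma bucket_classify (ql : String) (n : pvNode) (i : Int) (hi : i = 0 ∨ i = 1 ∨ i = 2) :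
    pvBucket i (pvClassify ql n) = if pvRankB ql n == i then [n] else [] := by
  have hrank : pvRankB ql n =
      (if ql = pvName n then 0
       else if PySem.Str.startswith (pvName n) ql then 1
       else if PySem.Str.isIn ql (pvName n) || PySem.Str.isIn ql (pvFile n) || PySem.Str.isIn ql (pvType n) then 2
       else 3) := rfl
  rw [hrank]
  unfold pvClassify pvBucket
  rcases hi with h | h | h <;> subst h <;> split_ifs <;> simp_all

lemma bucket_filter (ql : String) (nodes : List pvNode) (i : Int) (hi : i = 0 ∨ i = 1 ∨ i = 2) :
    pvBucket i (nodes.flatMap (pvClassify ql)) = nodes.filter (fun n => pvRankB ql n == i) := by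
  induction nodes with
  | nil => simp [pvBucket]
  | cons n ns ih =>
    rw [List.flatMap_cons, pvBucket_append, ih, bucket_classify ql n i hi, List.filter_cons]
    split_ifs with h <;> simp_all

-- ===== VERDICT (by name: the statement is the Claim_ definition above) =====
theorem search_nodes_py_spec : Claim_equal_search_nodes_py := by
  intro nodes query _
  unfold Spec_search_nodes_py search_nodes_py search_nodes_py_alt
  have hname : ∀ node : pvNode, PySem.Str.lower (pvOrStr ((PySem.Dict.ofList node).get? "name") "") = pvName node := fun _ => rfl
  have htype : ∀ node : pvNode, PySem.Str.lower (pvOrStr ((PySem.Dict.ofList node).get? "type") (pvOrStr ((PySem.Dict.ofList node).get? "node_type") "")) = pvType node := fun _ => rfl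
  have hfile : ∀ node : pvNode, PySem.Str.lower (pvOrStr ((PySem.Dict.ofList node).get? "file") (pvOrStr ((PySem.Dict.ofList node).get? "file_path") "")) = pvFile node := fun _ => rfl
  simp only [hname, htype, hfile]
  rw [foldA_eq (PySem.Str.lower query) nodes []]
  rw [PySem.List.sorted_eq_foldl_insertBy]
  have := sort_buckets (nodes.flatMap (pvClassify (PySem.Str.lower query))) [] [] []
    (by intro r hr; obtain ⟨n, _, hn⟩ := List.mem_flatMap.1 hr; exact classify_tags _ n r hn)
  simp only [pvTag, List.map_nil, List.nil_append] at this
  rw [show (fun (acc : List (Int × pvNode)) (x : Int × pvNode) => PySem.List.insertBy pvBf x acc)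
        = (fun acc x => PySem.List.insertBy (fun a b => decide (a.1 < b.1)) x acc) from rfl] at this
  simp only [List.nil_append]
  rw [this]
  rw [bucket_filter _ _ 0 (Or.inl rfl), bucket_filter _ _ 1 (Or.inr (Or.inl rfl)),
      bucket_filter _ _ 2 (Or.inr (Or.inr rfl))] at *
  simp [List.flatMap_cons]
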